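-- pv_equiv track=rewrite | github.com/ming2tofu33/pjt-wedding_planner_AI_agent | bae/nodes.py | _classify_error_fallback
-- ===== SOURCE A (Python) =====
-- def _classify_error_fallback(error_reason: str, error_status: str) -> tuple:
--     """Rule-based error classification when LLM analysis fails"""
--
--     error_reason_lower = error_reason.lower()
--
--     # Technical errors
--     if any(keyword in error_reason_lower for keyword in ['connection', 'timeout', 'api', 'database', 'server']):
--         return 'technical', 'high', 'automatic'
--
--     # User input errors
--     elif any(keyword in error_reason_lower for keyword in ['parsing', 'empty', 'invalid', 'format']):
--         return 'user_input', 'low', 'guided'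
--
--     # Context errors
--     elif any(keyword in error_reason_lower for keyword in ['memory', 'profile', 'missing', 'incomplete']):
--         return 'context', 'medium', 'guided'
--
--     # Integration errors
--     elif any(keyword in error_reason_lower for keyword in ['tool', 'execution', 'failed']):
--         return 'integration', 'medium', 'alternative'
--
--     else:
--         return 'technical', 'medium', 'guided'
-- ===== SOURCE B (Python) =====
-- # Flat keyword->priority map; classify by taking the MINIMUM priority among all
-- # matching keywords (not a first-match scan), then index into the results table.
-- _KEYWORD_PRIORITY = {
--     'connection': 0, 'timeout': 0, 'api': 0, 'database': 0, 'server': 0,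
--     'parsing': 1, 'empty': 1, 'invalid': 1, 'format': 1,
--     'memory': 2, 'profile': 2, 'missing': 2, 'incomplete': 2,
--     'tool': 3, 'execution': 3, 'failed': 3,
-- }
-- _RESULTS = [
--     ('technical', 'high', 'automatic'),
--     ('user_input', 'low', 'guided'),
--     ('context', 'medium', 'guided'),
--     ('integration', 'medium', 'alternative'),
--     ('technical', 'medium', 'guided'),
-- ]
--
-- def _classify_error_fallback(error_reason: str, error_status: str) -> tuple:
--     """Rule-based error classification when LLM analysis fails."""
--     reason = error_reason.lower()
--     best = min((p for kw, p in _KEYWORD_PRIORITY.items() if kw in reason),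
--                default=len(_RESULTS) - 1)
--     return _RESULTS[best]
-- ===== Notes on version B (the rewrite author's own statement) =====
-- stated objective: alternative
-- what changed: Instead of an if/elif ladder checking keyword groups in priority order, B scans one flat keyword-to-priority map, takes the minimum priority among all matching keywords, and indexes a results table; equivalent because the first ladder branch to fire is exactly the minimum-priority matching category.
import Mathlib
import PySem

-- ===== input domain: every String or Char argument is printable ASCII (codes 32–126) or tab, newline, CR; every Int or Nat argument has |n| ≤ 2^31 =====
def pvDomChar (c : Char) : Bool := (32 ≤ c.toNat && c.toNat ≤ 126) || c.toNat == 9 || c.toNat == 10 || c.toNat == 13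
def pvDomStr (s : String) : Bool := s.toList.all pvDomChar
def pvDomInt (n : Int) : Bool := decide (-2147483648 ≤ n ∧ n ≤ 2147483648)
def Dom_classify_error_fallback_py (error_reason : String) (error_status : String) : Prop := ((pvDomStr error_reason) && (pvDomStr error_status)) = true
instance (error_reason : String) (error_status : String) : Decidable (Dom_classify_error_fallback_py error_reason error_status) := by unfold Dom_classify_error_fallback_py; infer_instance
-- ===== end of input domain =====

-- B replaces A's if/elif ladder by a flat keyword→priority map: it takes the minimum
-- priority among all matching keywords and indexes a results table (alternative algorithm, same cost).


-- ===== PORT A =====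
-- literal transliteration of the if/elif ladder; 'k in s' is PySem.Str.isIn (exact)
def classify_error_fallback_py (error_reason : String) (error_status : String) : String × String × String :=
  let error_reason_lower := PySem.Str.lower error_reason
  if ["connection", "timeout", "api", "database", "server"].any (fun k => PySem.Str.isIn k error_reason_lower) then
    ("technical", "high", "automatic")
  else if ["parsing", "empty", "invalid", "format"].any (fun k => PySem.Str.isIn k error_reason_lower) then
    ("user_input", "low", "guided")
  else if ["memory", "profile", "missing", "incomplete"].any (fun k => PySem.Str.isIn k error_reason_lower) then
    ("context", "medium", "guided")
  else if ["tool", "execution", "failed"].any (fun k => PySem.Str.isIn k error_reason_lower) then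
    ("integration", "medium", "alternative")
  else
    ("technical", "medium", "guided")

-- ===== PORT B =====
-- B's flat keyword→priority map (dict in insertion order) and results table
def pvKwPrio : List (String × Nat) :=
  [ ("connection", 0), ("timeout", 0), ("api", 0), ("database", 0), ("server", 0),
    ("parsing", 1), ("empty", 1), ("invalid", 1), ("format", 1),
    ("memory", 2), ("profile", 2), ("missing", 2), ("incomplete", 2),
    ("tool", 3), ("execution", 3), ("failed", 3) ]

def pvResults : List (String × String × String) :=
  [ ("technical", "high", "automatic"),
    ("user_input", "low", "guided"),
    ("context", "medium", "guided"),
    ("integration", "medium", "alternative"),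
    ("technical", "medium", "guided") ]

-- min over the matching priorities with default 4 = len(_RESULTS)-1, as a fold;
-- _RESULTS[best] never raises (best ≤ 4 by construction), so getD is exact here
def classify_error_fallback_py_alt (error_reason : String) (error_status : String) : String × String × String :=
  let reason := PySem.Str.lower error_reason
  let best := pvKwPrio.foldl (fun acc kp => if PySem.Str.isIn kp.1 reason then min acc kp.2 else acc) (pvResults.length - 1)
  pvResults.getD best ("technical", "medium", "guided")

-- ===== PRECONDITION & SPEC =====
def Spec_classify_error_fallback_py (error_reason : String) (error_status : String) (out : String × String × String) : Prop := out = classify_error_fallback_py_alt error_reason error_status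
instance (error_reason : String) (error_status : String) (out : String × String × String) : Decidable (Spec_classify_error_fallback_py error_reason error_status out) := by unfold Spec_classify_error_fallback_py; infer_instance

-- ===== CLAIM (what is proved, stated in full; the proofs are below) =====
def Claim_equal_classify_error_fallback_py : Prop := ∀ (error_reason : String) (error_status : String), Dom_classify_error_fallback_py error_reason error_status → Spec_classify_error_fallback_py error_reason error_status (classify_error_fallback_py error_reason error_status)

-- ===== LEMMAS AND PROOFS =====

-- folding B's min-update over one priority group (all keywords paired with the same p)
theorem pv_fold_group (reason : String) (p acc : Nat) (L : List String) :
    (L.map (fun k => (k, p))).foldl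
        (fun acc kp => if PySem.Str.isIn kp.1 reason then min acc kp.2 else acc) acc
      = if L.any (fun k => PySem.Str.isIn k reason) then min acc p else acc := by
  induction L generalizing acc with
  | nil => simp
  | cons k L ih =>
    simp only [List.map_cons, List.foldl_cons, List.any_cons]
    by_cases h : PySem.Str.isIn k reason = true
    · rw [if_pos h, ih]
      have hc : (PySem.Str.isIn k reason || L.any fun k => PySem.Str.isIn k reason) = true := by
        rw [h, Bool.true_or]
      rw [if_pos hc]
      by_cases h2 : (L.any fun k => PySem.Str.isIn k reason) = true
      · rw [if_pos h2]; omega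
      · rw [if_neg h2]
    · have hf : PySem.Str.isIn k reason = false := eq_false_of_ne_true h
      rw [if_neg h, ih]
      simp only [hf, Bool.false_or]

theorem classify_error_fallback_py_spec_aux (error_reason error_status : String) :
    classify_error_fallback_py error_reason error_status
      = classify_error_fallback_py_alt error_reason error_status := by
  unfold classify_error_fallback_py classify_error_fallback_py_alt
  have hkw : pvKwPrio
      = (["connection", "timeout", "api", "database", "server"].map (fun k => (k, 0)))
        ++ (["parsing", "empty", "invalid", "format"].map (fun k => (k, 1)))
        ++ (["memory", "profile", "missing", "incomplete"].map (fun k => (k, 2)))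
        ++ (["tool", "execution", "failed"].map (fun k => (k, 3))) := rfl
  rw [hkw]
  simp only [List.foldl_append, pv_fold_group]
  split_ifs <;> simp_all [pvResults]

-- ===== VERDICT (by name: the statement is the Claim_ definition above) =====
theorem classify_error_fallback_py_spec : Claim_equal_classify_error_fallback_py := by
  intro r s _
  unfold Spec_classify_error_fallback_py
  exact classify_error_fallback_py_spec_aux r s
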